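-- pv_equiv track=rewrite | github.com/Ana-1123/Computational-Number-Theory | Tema1/main.py | frombase_to_decimal
-- ===== SOURCE A (Python) =====
-- def frombase_to_decimal(m, p):
--     lenn = len(m)
--     power = 1
--     num = 0
--     # Decimal equivalent is m[len-1]*1 + m[len-2]*p + m[len-3]*(p^2) + ...
--     for i in range(lenn - 1, -1, -1):
--         num += m[i] * power
--         power = power * p
--
--     return num
-- ===== SOURCE B (Python) =====
-- def frombase_to_decimal(m, p):
--     num = 0
--     for d in m:
--         num = num * p + d
--     return num
-- ===== Notes on version B (the rewrite author's own statement) =====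
-- stated objective: idiomatic
-- what changed: Replaces the reversed-index loop with a separate power accumulator by Horner's method: a single front-to-back pass maintaining only num = num*p + d.
import Mathlib
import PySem

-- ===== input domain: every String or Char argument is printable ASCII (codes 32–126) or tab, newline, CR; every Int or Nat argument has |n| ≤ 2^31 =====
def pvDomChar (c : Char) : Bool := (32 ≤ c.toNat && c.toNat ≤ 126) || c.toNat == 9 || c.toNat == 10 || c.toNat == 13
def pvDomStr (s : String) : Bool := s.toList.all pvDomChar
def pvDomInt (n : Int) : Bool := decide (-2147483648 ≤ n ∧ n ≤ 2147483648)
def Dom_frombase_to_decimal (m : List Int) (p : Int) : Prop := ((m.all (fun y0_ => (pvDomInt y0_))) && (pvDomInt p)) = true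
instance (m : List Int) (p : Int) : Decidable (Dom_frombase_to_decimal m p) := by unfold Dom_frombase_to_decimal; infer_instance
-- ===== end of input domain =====

-- B replaces A's reversed-index loop with a power accumulator by Horner's method (front-to-back, one accumulator): an idiomatic different decomposition, same O(n) cost.


-- ===== PORT A =====
-- literal transliteration of A: power=1, num=0; for i in range(len(m)-1, -1, -1): num += m[i]*power; power *= p
def frombase_to_decimal (m : List Int) (p : Int) : Int :=
  let lenn : Int := m.length
  let st := (PySem.List.pyRange (lenn - 1) (-1) (-1)).foldl
    (fun (st : Int × Int) i => (st.1 * p, st.2 + PySem.List.pyGetD m i 0 * st.1)) (1, 0)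
  st.2

-- ===== PORT B =====
-- Horner's method: num = 0; for d in m: num = num*p + d
def frombase_to_decimal_alt (m : List Int) (p : Int) : Int :=
  m.foldl (fun num d => num * p + d) 0

-- ===== PRECONDITION & SPEC =====
def Spec_frombase_to_decimal (m : List Int) (p : Int) (out : Int) : Prop := out = frombase_to_decimal_alt m p
instance (m : List Int) (p : Int) (out : Int) : Decidable (Spec_frombase_to_decimal m p out) := by unfold Spec_frombase_to_decimal; infer_instance

-- ===== CLAIM (what is proved, stated in full; the proofs are below) =====
def Claim_equal_frombase_to_decimal : Prop := ∀ (m : List Int) (p : Int), Dom_frombase_to_decimal m p → Spec_frombase_to_decimal m p (frombase_to_decimal m p)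

-- ===== LEMMAS AND PROOFS =====

-- Horner's fold with an arbitrary accumulator splits off a * p^|m|.
theorem horner_shift (p : Int) (m : List Int) (a : Int) :
    m.foldl (fun num d => num * p + d) a
      = a * p ^ m.length + m.foldl (fun num d => num * p + d) 0 := by
  induction m generalizing a with
  | nil => simp
  | cons d t ih =>
      simp only [List.foldl_cons, List.length_cons]
      rw [ih (a * p + d), ih (0 * p + d)]
      ring

-- A's loop body, folded over m.reverse, computes (p^|m|, Horner value).
theorem revfold_eq (p : Int) (m : List Int) (pw nm : Int) :
    m.reverse.foldl (fun (st : Int × Int) d => (st.1 * p, st.2 + d * st.1)) (pw, nm)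
      = (pw * p ^ m.length, nm + pw * m.foldl (fun num d => num * p + d) 0) := by
  induction m generalizing pw nm with
  | nil => simp
  | cons d t ih =>
      rw [List.reverse_cons, List.foldl_append, ih]
      simp only [List.foldl_cons, List.length_cons]
      rw [horner_shift p t (0 * p + d)]
      simp only [List.foldl_nil, Prod.mk.injEq]
      constructor <;> ring

-- A's fold over the countdown index range equals the fold over m.reverse.
theorem index_fold_eq (p : Int) (m : List Int) :
    (PySem.List.pyRange ((m.length : Int) - 1) (-1) (-1)).foldl
        (fun (st : Int × Int) i => (st.1 * p, st.2 + PySem.List.pyGetD m i 0 * st.1)) (1, 0)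
      = m.reverse.foldl (fun (st : Int × Int) d => (st.1 * p, st.2 + d * st.1)) (1, 0) := by
  have h : PySem.List.pyRange ((m.length : Int) - 1) (-1) (-1)
      = (PySem.List.pyRange 0 (m.length : Int) 1).reverse := by
    have := PySem.List.pyRange_neg_one_eq_reverse ((m.length : Int) - 1) (-1)
    simpa using this
  have h2 : ((PySem.List.pyRange 0 (m.length : Int) 1).map (fun i => PySem.List.pyGetD m i 0)) = m :=
    PySem.List.map_pyGetD_pyRange_zero m 0
  rw [h]
  conv_rhs => rw [← h2, ← List.map_reverse, List.foldl_map]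

-- ===== VERDICT (by name: the statement is the Claim_ definition above) =====
theorem frombase_to_decimal_spec : Claim_equal_frombase_to_decimal := by
  intro m p _
  unfold Spec_frombase_to_decimal frombase_to_decimal frombase_to_decimal_alt
  simp only []
  rw [index_fold_eq, revfold_eq]
  simp
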